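-- pv_equiv track=rewrite | github.com/JanHouser/pg | fourth.py | je_tah_mozny_strelec
-- ===== SOURCE A (Python) =====
-- def je_tah_mozny_strelec(strelec, cilova_pozice, obsazene_pozice):
--     r, s = strelec
--     r2, s2 = cilova_pozice
--     dr = r2 - r
--     ds = s2 - s
--
--     if abs(dr) != abs(ds) or (dr == 0 and ds == 0):
--         return False
--
--     krok_r = 1 if dr > 0 else -1
--     krok_s = 1 if ds > 0 else -1
--
--     for i in range(1, abs(dr)):
--         mezilehla_pozice = (r + i * krok_r, s + i * krok_s)
--         if mezilehla_pozice in obsazene_pozice: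
--             return False
--
--     if cilova_pozice in obsazene_pozice:
--         return False
--
--     return True
-- ===== SOURCE B (Python) =====
-- def _blokuje(r, s, dr, ds, p):
--     # p lies on the open-start, closed-end diagonal segment from (r, s) to
--     # (r + dr, s + ds): collinear (cross product) and projection in (0, dr*dr]
--     pr, ps = p
--     ar = pr - r
--     az = ps - s
--     return ar * ds == az * dr and 0 < ar * dr <= dr * dr
--
--
-- def je_tah_mozny_strelec(strelec, cilova_pozice, obsazene_pozice):
--     r, s = strelec
--     r2, s2 = cilova_pozice
--     dr = r2 - r
--     ds = s2 - s
--     # legal bishop move: equal squares of the deltas, and nonzero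
--     if dr * dr != ds * ds or dr == 0:
--         return False
--     return all(not _blokuje(r, s, dr, ds, p) for p in obsazene_pozice)
-- ===== Notes on version B (the rewrite author's own statement) =====
-- stated objective: alternative
-- what changed: Instead of walking each diagonal square with per-step sign computation and membership scans (plus a separate occupied-target check), B tests each occupied piece once with cross-product collinearity and a projection bound 0 < ar*dr <= dr*dr, with no abs, no step signs and no range loop.
import Mathlib
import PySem

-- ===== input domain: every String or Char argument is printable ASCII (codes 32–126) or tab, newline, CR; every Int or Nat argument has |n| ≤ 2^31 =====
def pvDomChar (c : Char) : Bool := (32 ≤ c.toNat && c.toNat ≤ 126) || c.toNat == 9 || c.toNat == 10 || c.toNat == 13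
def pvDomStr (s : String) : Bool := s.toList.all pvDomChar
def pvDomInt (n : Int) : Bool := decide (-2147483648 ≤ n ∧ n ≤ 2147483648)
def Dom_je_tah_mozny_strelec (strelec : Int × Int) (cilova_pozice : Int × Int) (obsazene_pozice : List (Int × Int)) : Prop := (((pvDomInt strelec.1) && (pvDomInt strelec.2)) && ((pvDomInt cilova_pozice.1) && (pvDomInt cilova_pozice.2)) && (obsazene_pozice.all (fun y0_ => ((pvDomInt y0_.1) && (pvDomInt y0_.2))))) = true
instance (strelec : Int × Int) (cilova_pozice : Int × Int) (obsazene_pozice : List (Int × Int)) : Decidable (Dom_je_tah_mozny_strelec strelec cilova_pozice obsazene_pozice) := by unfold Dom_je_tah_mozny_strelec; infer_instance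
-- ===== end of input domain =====

-- B replaces A's walk over the diagonal squares (per-step signs plus membership scans and a
-- separate target check) by one pass over the pieces with a cross-product/projection test;
-- equal on all inputs.

-- ===== PORT A =====
def je_tah_mozny_strelec (strelec : Int × Int) (cilova_pozice : Int × Int) (obsazene_pozice : List (Int × Int)) : Bool :=
  let r := strelec.1
  let s := strelec.2
  let r2 := cilova_pozice.1
  let s2 := cilova_pozice.2
  let dr := r2 - r
  let ds := s2 - s
  if |dr| ≠ |ds| ∨ (dr = 0 ∧ ds = 0) then false
  else
    let krok_r : Int := if dr > 0 then 1 else -1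
    let krok_s : Int := if ds > 0 then 1 else -1
    -- for-loop with early return ≡ any over range(1, abs(dr))
    if (PySem.List.pyRange 1 |dr|).any
        (fun i => obsazene_pozice.contains (r + i * krok_r, s + i * krok_s)) then false
    else if obsazene_pozice.contains cilova_pozice then false
    else true

-- ===== PORT B =====
-- helper _blokuje of Source B: cross-product collinearity plus projection bound
def pv_blokuje (r s dr ds : Int) (p : Int × Int) : Bool :=
  let ar := p.1 - r
  let az := p.2 - s
  decide (ar * ds = az * dr ∧ 0 < ar * dr ∧ ar * dr ≤ dr * dr)

def je_tah_mozny_strelec_alt (strelec : Int × Int) (cilova_pozice : Int × Int) (obsazene_pozice : List (Int × Int)) : Bool :=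
  let r := strelec.1
  let s := strelec.2
  let dr := cilova_pozice.1 - r
  let ds := cilova_pozice.2 - s
  if dr * dr ≠ ds * ds ∨ dr = 0 then false
  else obsazene_pozice.all (fun p => !pv_blokuje r s dr ds p)

-- ===== PRECONDITION & SPEC =====
def Spec_je_tah_mozny_strelec (strelec : Int × Int) (cilova_pozice : Int × Int) (obsazene_pozice : List (Int × Int)) (out : Bool) : Prop := out = je_tah_mozny_strelec_alt strelec cilova_pozice obsazene_pozice
instance (strelec : Int × Int) (cilova_pozice : Int × Int) (obsazene_pozice : List (Int × Int)) (out : Bool) : Decidable (Spec_je_tah_mozny_strelec strelec cilova_pozice obsazene_pozice out) := by unfold Spec_je_tah_mozny_strelec; infer_instance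

-- ===== CLAIM (what is proved, stated in full; the proofs are below) =====
def Claim_equal_je_tah_mozny_strelec : Prop := ∀ (strelec : Int × Int) (cilova_pozice : Int × Int) (obsazene_pozice : List (Int × Int)), Dom_je_tah_mozny_strelec strelec cilova_pozice obsazene_pozice → Spec_je_tah_mozny_strelec strelec cilova_pozice obsazene_pozice (je_tah_mozny_strelec strelec cilova_pozice obsazene_pozice)

-- ===== LEMMAS AND PROOFS =====

theorem pv_if_or (a b : Bool) : (if a then false else if b then false else true) = !(a || b) := by
  cases a <;> cases b <;> rfl

-- A's guard and B's guard accept the same inputs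
theorem pv_guard_iff (dr ds : Int) :
    (¬ |dr| = |ds| ∨ (dr = 0 ∧ ds = 0)) ↔ (¬ dr * dr = ds * ds ∨ dr = 0) := by
  rw [show (|dr| = |ds|) ↔ dr * dr = ds * ds by rw [abs_eq_abs, mul_self_eq_mul_self_iff]]
  constructor
  · rintro (h | ⟨h0, _⟩)
    · exact Or.inl h
    · exact Or.inr h0
  · rintro (h | h0)
    · exact Or.inl h
    · by_cases hs : dr * dr = ds * ds
      · refine Or.inr ⟨h0, mul_self_eq_zero.mp ?_⟩
        rw [← hs, h0]; ring
      · exact Or.inl hs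

-- a piece (pr, ps) is the i-th square of the diagonal for some 1 ≤ i ≤ n
-- iff it passes the ±1-step arithmetic test
theorem pv_path_iff (r s kr ks n pr ps : Int)
    (hkr : kr = 1 ∨ kr = -1) (hks : ks = 1 ∨ ks = -1) :
    ((ps - s) * ks = (pr - r) * kr ∧ 1 ≤ (pr - r) * kr ∧ (pr - r) * kr ≤ n)
    ↔ ∃ i, 1 ≤ i ∧ i ≤ n ∧ pr = r + i * kr ∧ ps = s + i * ks := by
  rcases hkr with rfl | rfl <;> rcases hks with rfl | rfl <;>
    simp only [mul_one, mul_neg_one] <;> constructor <;>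
    first
      | (rintro ⟨i, h1, h2, h3, h4⟩; omega)
      | (rintro ⟨h1, h2, h3⟩
         first
           | exact ⟨pr - r, by omega⟩
           | exact ⟨r - pr, by omega⟩)

-- B's cross-product/projection test coincides with the ±1-step test once dr = n*kr, ds = n*ks
theorem pv_cond_iff (r s kr ks n pr ps : Int)
    (hkr : kr = 1 ∨ kr = -1) (hks : ks = 1 ∨ ks = -1) (hn : 0 < n) :
    ((pr - r) * (n * ks) = (ps - s) * (n * kr) ∧
      0 < (pr - r) * (n * kr) ∧ (pr - r) * (n * kr) ≤ (n * kr) * (n * kr))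
    ↔ ((ps - s) * ks = (pr - r) * kr ∧ 1 ≤ (pr - r) * kr ∧ (pr - r) * kr ≤ n) := by
  rcases hkr with rfl | rfl <;> rcases hks with rfl | rfl <;>
    constructor <;> rintro ⟨h1, h2, h3⟩ <;>
    refine ⟨by nlinarith, by nlinarith, by nlinarith⟩

-- the two occupancy tests see the same pieces
theorem pv_occ_iff (r s r2 s2 kr ks n : Int) (obs : List (Int × Int))
    (hkr : kr = 1 ∨ kr = -1) (hks : ks = 1 ∨ ks = -1) (hn : 1 ≤ n)
    (hdr : r2 - r = n * kr) (hds : s2 - s = n * ks) :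
    ((∃ i, (1 ≤ i ∧ i < n) ∧ (r + i * kr, s + i * ks) ∈ obs) ∨ (r2, s2) ∈ obs)
    ↔ ∃ q ∈ obs, ((q.2 - s) * ks = (q.1 - r) * kr ∧
                  1 ≤ (q.1 - r) * kr ∧ (q.1 - r) * kr ≤ n) := by
  constructor
  · rintro (⟨i, ⟨h1, h2⟩, hm⟩ | hm)
    · refine ⟨_, hm, (pv_path_iff r s kr ks n _ _ hkr hks).mpr ⟨i, h1, le_of_lt h2, rfl, rfl⟩⟩
    · exact ⟨_, hm, (pv_path_iff r s kr ks n r2 s2 hkr hks).mpr ⟨n, hn, le_refl n, by linarith, by linarith⟩⟩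
  · rintro ⟨⟨pr, ps⟩, hm, hp⟩
    obtain ⟨i, h1, h2, h3, h4⟩ := (pv_path_iff r s kr ks n pr ps hkr hks).mp hp
    rcases lt_or_eq_of_le h2 with hlt | rfl
    · exact Or.inl ⟨i, ⟨h1, hlt⟩, by rw [← h3, ← h4]; exact hm⟩
    · right
      have : r2 = pr ∧ s2 = ps := by constructor <;> linarith
      rw [this.1, this.2]; exact hm

theorem je_tah_mozny_strelec_eq (strelec cilova_pozice : Int × Int)
    (obsazene_pozice : List (Int × Int)) :
    je_tah_mozny_strelec strelec cilova_pozice obsazene_pozice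
      = je_tah_mozny_strelec_alt strelec cilova_pozice obsazene_pozice := by
  obtain ⟨r, s⟩ := strelec
  obtain ⟨r2, s2⟩ := cilova_pozice
  unfold je_tah_mozny_strelec je_tah_mozny_strelec_alt
  by_cases hg : |r2 - r| ≠ |s2 - s| ∨ (r2 - r = 0 ∧ s2 - s = 0)
  · rw [if_pos hg, if_pos ((pv_guard_iff _ _).mp hg)]
  · rw [if_neg hg, if_neg (fun h => hg ((pv_guard_iff _ _).mpr h))]
    push Not at hg
    obtain ⟨h1, h2⟩ := hg
    set kr : Int := if r2 - r > 0 then 1 else -1 with hkrdef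
    set ks : Int := if s2 - s > 0 then 1 else -1 with hksdef
    have hkr : kr = 1 ∨ kr = -1 := by rw [hkrdef]; split <;> simp
    have hks : ks = 1 ∨ ks = -1 := by rw [hksdef]; split <;> simp
    have hdr0 : r2 - r ≠ 0 := by
      intro h0
      exact h2 h0 (abs_eq_zero.mp (h1 ▸ (abs_eq_zero.mpr h0)))
    have hn : (1 : Int) ≤ |r2 - r| := by have := abs_pos.mpr hdr0; omega
    have hdr : r2 - r = |r2 - r| * kr := by
      rw [hkrdef]
      by_cases h : 0 < r2 - r
      · rw [if_pos h, mul_one, abs_of_pos h]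
      · rw [if_neg h, mul_neg_one, abs_of_nonpos (by omega : r2 - r ≤ 0)]; ring
    have hds : s2 - s = |r2 - r| * ks := by
      rw [hksdef, h1]
      by_cases h : 0 < s2 - s
      · rw [if_pos h, mul_one, abs_of_pos h]
      · rw [if_neg h, mul_neg_one, abs_of_nonpos (by omega : s2 - s ≤ 0)]; ring
    have key := pv_occ_iff r s r2 s2 kr ks (|r2 - r|) obsazene_pozice hkr hks hn hdr hds
    rw [pv_if_or]
    have hmain :
        ((PySem.List.pyRange 1 |r2 - r|).any
          (fun i => obsazene_pozice.contains (r + i * kr, s + i * ks))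
         || obsazene_pozice.contains (r2, s2))
        = obsazene_pozice.any (fun q => pv_blokuje r s (r2 - r) (s2 - s) q) := by
      rw [Bool.eq_iff_iff]
      simp only [Bool.or_eq_true, List.any_eq_true, List.contains_iff_mem,
        PySem.List.mem_pyRange_one, pv_blokuje, decide_eq_true_eq]
      constructor
      · intro h
        have h' : ∃ q ∈ obsazene_pozice, ((q.2 - s) * ks = (q.1 - r) * kr ∧
              1 ≤ (q.1 - r) * kr ∧ (q.1 - r) * kr ≤ |r2 - r|) := by
          rcases h with ⟨i, hi, hm⟩ | hm
          · exact key.mp (Or.inl ⟨i, hi, hm⟩)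
          · exact key.mp (Or.inr hm)
        obtain ⟨q, hq, hc⟩ := h'
        refine ⟨q, hq, ?_⟩
        rw [hdr, hds]
        exact (pv_cond_iff r s kr ks (|r2 - r|) q.1 q.2 hkr hks (by omega)).mpr hc
      · rintro ⟨q, hq, hc⟩
        rw [hdr, hds] at hc
        have hc' := (pv_cond_iff r s kr ks (|r2 - r|) q.1 q.2 hkr hks (by omega)).mp hc
        rcases key.mpr ⟨q, hq, hc'⟩ with ⟨i, hi, hm⟩ | hm
        · exact Or.inl ⟨i, hi, hm⟩
        · exact Or.inr hm
    rw [hmain, Bool.eq_iff_iff]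
    simp [List.all_eq_true]

-- ===== VERDICT (by name: the statement is the Claim_ definition above) =====
theorem je_tah_mozny_strelec_spec : Claim_equal_je_tah_mozny_strelec := by
  intro strelec cilova_pozice obsazene_pozice _
  exact je_tah_mozny_strelec_eq strelec cilova_pozice obsazene_pozice
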